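-- pv_equiv track=rewrite | github.com/officialosmansaleh/product-finder | Backend/app/ai_parser.py | _is_close_token
-- ===== SOURCE A (Python) =====
-- def _tok_base(tok: str) -> str:
--     t = (tok or "").strip().lower()
--     if len(t) > 4 and t.endswith("ies"):
--         return t[:-3] + "y"
--     if len(t) > 4 and t.endswith("es"):
--         return t[:-2]
--     if len(t) > 3 and t.endswith("s"):
--         return t[:-1]
--     return t
--
-- def _is_close_token(a: str, b: str) -> bool:
--     a = _tok_base(a)
--     b = _tok_base(b)
--     if not a or not b:
--         return False
--     if a == b:
--         return True
--     if len(a) < 4 or len(b) < 4: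
--         return False
--     if abs(len(a) - len(b)) > 1:
--         return False
--     if len(a) == len(b):
--         return sum(1 for x, y in zip(a, b) if x != y) <= 1
--     s, l = (a, b) if len(a) < len(b) else (b, a)
--     i = j = mism = 0
--     while i < len(s) and j < len(l):
--         if s[i] == l[j]:
--             i += 1
--             j += 1
--         else:
--             mism += 1
--             if mism > 1:
--                 return False
--             j += 1
--     return True
-- ===== SOURCE B (Python) =====
-- def _tok_base(tok: str) -> str:
--     t = (tok or "").strip().lower()
--     if len(t) > 4 and t.endswith("ies"):
--         return t[:-3] + "y"
--     if len(t) > 4 and t.endswith("es"):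
--         return t[:-2]
--     if len(t) > 3 and t.endswith("s"):
--         return t[:-1]
--     return t
--
-- def _common_prefix_len(x: str, y: str) -> int:
--     n = min(len(x), len(y))
--     i = 0
--     while i < n and x[i] == y[i]:
--         i += 1
--     return i
--
-- def _is_close_token(a: str, b: str) -> bool:
--     a = _tok_base(a)
--     b = _tok_base(b)
--     if not a or not b:
--         return False
--     if a == b:
--         return True
--     if len(a) < 4 or len(b) < 4:
--         return False
--     if abs(len(a) - len(b)) > 1:
--         return False
--     # edit distance <= 1 via longest common prefix + longest common suffix:
--     # equal lengths need p + q >= n - 1 (one substitution); lengths off by one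
--     # need p + q >= min length (one insertion); both are p + q >= (la+lb-1)//2.
--     p = _common_prefix_len(a, b)
--     q = _common_prefix_len(a[::-1], b[::-1])
--     return p + q >= (len(a) + len(b) - 1) // 2
-- ===== Notes on version B (the rewrite author's own statement) =====
-- stated objective: alternative
-- what changed: Replaces A's two distinct edit checks (Hamming count over zip for equal lengths, greedy two-pointer deletion scan for off-by-one lengths) with a single prefix/suffix decomposition: compute the longest common prefix and the longest common suffix and compare their sum against one arithmetic threshold (la+lb-1)//2 covering both cases.
import Mathlib
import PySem

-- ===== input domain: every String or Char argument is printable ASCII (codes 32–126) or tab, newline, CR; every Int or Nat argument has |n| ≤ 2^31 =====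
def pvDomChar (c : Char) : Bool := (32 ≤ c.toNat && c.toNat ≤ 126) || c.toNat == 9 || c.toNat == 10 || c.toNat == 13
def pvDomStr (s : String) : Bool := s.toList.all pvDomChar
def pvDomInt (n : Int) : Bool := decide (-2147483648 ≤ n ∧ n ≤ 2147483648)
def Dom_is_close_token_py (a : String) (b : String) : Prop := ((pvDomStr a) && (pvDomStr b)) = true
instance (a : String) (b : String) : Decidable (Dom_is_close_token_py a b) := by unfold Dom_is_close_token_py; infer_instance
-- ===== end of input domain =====

-- B replaces A's two separate near-match checks (Hamming count / greedy two-pointer scan) by one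
-- longest-common-prefix + longest-common-suffix comparison against a single arithmetic threshold
-- (objective: alternative decomposition, same cost).

-- ===== PORT A =====
-- shared normalization helper (_tok_base; identical in Source A and Source B)
def pvTokBase (tok : List Char) : List Char :=
  let t := PySem.Chars.lower (PySem.Chars.strip tok)
  if 4 < t.length ∧ PySem.Chars.endswith t ['i', 'e', 's'] then
    PySem.List.slice t none (some (-3)) ++ ['y']
  else if 4 < t.length ∧ PySem.Chars.endswith t ['e', 's'] then
    PySem.List.slice t none (some (-2))
  else if 3 < t.length ∧ PySem.Chars.endswith t ['s'] then
    PySem.List.slice t none (some (-1))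
  else t

-- the while-loop of A (pointers i, j become the unconsumed suffixes of s and l)
def pvLoopA : List Char → List Char → Nat → Bool
  | x :: s', y :: l', mism =>
    if x = y then pvLoopA s' l' mism
    else if 1 < mism + 1 then false
    else pvLoopA (x :: s') l' (mism + 1)
  | _, _, _ => true
  termination_by _ l _ => l.length

def is_close_token_py (a : String) (b : String) : Bool :=
  let a' := pvTokBase a.toList
  let b' := pvTokBase b.toList
  if a' = [] ∨ b' = [] then false
  else if a' = b' then true
  else if a'.length < 4 ∨ b'.length < 4 then false
  else if 1 < ((a'.length : Int) - (b'.length : Int)).natAbs then false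
  else if a'.length = b'.length then
    decide ((a'.zip b').foldl (fun acc p => if p.1 ≠ p.2 then acc + 1 else acc) (0 : Int) ≤ 1)
  else
    let sl := if a'.length < b'.length then (a', b') else (b', a')
    pvLoopA sl.1 sl.2 0

-- ===== PORT B =====
-- _common_prefix_len of Source B (the index loop becomes structural recursion on both lists)
def pvLcp : List Char → List Char → Nat
  | x :: xs, y :: ys => if x = y then pvLcp xs ys + 1 else 0
  | _, _ => 0

def is_close_token_py_alt (a : String) (b : String) : Bool :=
  let a' := pvTokBase a.toList
  let b' := pvTokBase b.toList
  if a' = [] ∨ b' = [] then false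
  else if a' = b' then true
  else if a'.length < 4 ∨ b'.length < 4 then false
  else if 1 < ((a'.length : Int) - (b'.length : Int)).natAbs then false
  else
    let p := pvLcp a' b'
    let q := pvLcp a'.reverse b'.reverse
    decide ((a'.length + b'.length - 1) / 2 ≤ p + q)

-- ===== PRECONDITION & SPEC =====
def Spec_is_close_token_py (a : String) (b : String) (out : Bool) : Prop := out = is_close_token_py_alt a b
instance (a : String) (b : String) (out : Bool) : Decidable (Spec_is_close_token_py a b out) := by unfold Spec_is_close_token_py; infer_instance

-- ===== CLAIM (what is proved, stated in full; the proofs are below) =====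
def Claim_equal_is_close_token_py : Prop := ∀ (a : String) (b : String), Dom_is_close_token_py a b → Spec_is_close_token_py a b (is_close_token_py a b)

-- ===== LEMMAS AND PROOFS =====

theorem pvLcp_le_left (u v : List Char) : pvLcp u v ≤ u.length := by
  induction u generalizing v with
  | nil => simp [pvLcp]
  | cons x xs ih =>
    cases v with
    | nil => simp [pvLcp]
    | cons y ys =>
      simp only [pvLcp, List.length_cons]
      split
      · exact Nat.succ_le_succ (ih ys)
      · omega

theorem pvLcp_comm (u v : List Char) : pvLcp u v = pvLcp v u := by
  induction u generalizing v with
  | nil => cases v <;> simp [pvLcp]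
  | cons x xs ih =>
    cases v with
    | nil => simp [pvLcp]
    | cons y ys =>
      simp only [pvLcp]
      rcases eq_or_ne x y with h | h
      · subst h; simp [ih]
      · simp [h, Ne.symm h]

theorem pvLcp_append_left (u s t : List Char) :
    pvLcp (u ++ s) (u ++ t) = u.length + pvLcp s t := by
  induction u with
  | nil => simp
  | cons x xs ih => simp [pvLcp, ih]; omega

theorem pvLcp_append_ne (u v s t : List Char) (h : u.length = v.length) (hne : u ≠ v) :
    pvLcp (u ++ s) (v ++ t) = pvLcp u v := by
  induction u generalizing v with
  | nil => cases v <;> simp_all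
  | cons x xs ih =>
    cases v with
    | nil => simp at h
    | cons y ys =>
      simp only [List.cons_append, pvLcp]
      rcases eq_or_ne x y with hxy | hxy
      · subst hxy
        have hxs : xs ≠ ys := by intro hh; exact hne (by rw [hh])
        simp only [List.length_cons] at h
        simp [ih ys (by omega) hxs]
      · simp [hxy]

theorem pvLcp_lt_of_ne (u v : List Char) (h : u.length = v.length) (hne : u ≠ v) :
    pvLcp u v < u.length := by
  induction u generalizing v with
  | nil => cases v <;> simp_all
  | cons x xs ih =>
    cases v with
    | nil => simp at h
    | cons y ys =>
      simp only [pvLcp, List.length_cons]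
      rcases eq_or_ne x y with hxy | hxy
      · subst hxy
        have hxs : xs ≠ ys := by intro hh; exact hne (by rw [hh])
        simp only [List.length_cons] at h
        have := ih ys (by omega) hxs
        simp; omega
      · simp [hxy]

theorem pvLcp_take (u v : List Char) : u.take (pvLcp u v) = v.take (pvLcp u v) := by
  induction u generalizing v with
  | nil => simp [pvLcp]
  | cons x xs ih =>
    cases v with
    | nil => simp [pvLcp]
    | cons y ys =>
      simp only [pvLcp]
      rcases eq_or_ne x y with hxy | hxy
      · subst hxy; simp [List.take_succ_cons, ih ys]
      · simp [hxy]

theorem pvLcp_ge_of_take (u v : List Char) (k : Nat) (hu : k ≤ u.length) (hv : k ≤ v.length)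
    (h : u.take k = v.take k) : k ≤ pvLcp u v := by
  induction u generalizing v k with
  | nil => simp_all
  | cons x xs ih =>
    cases v with
    | nil => simp_all
    | cons y ys =>
      cases k with
      | zero => simp
      | succ k =>
        simp only [List.take_succ_cons, List.cons.injEq] at h
        simp only [pvLcp, h.1]
        simp only [List.length_cons] at hu hv
        have := ih ys k (by omega) (by omega) h.2
        simp; omega

-- mismatch count of A's equal-length branch
def pvCM (u v : List Char) : Nat := (u.zip v).countP (fun p => p.1 ≠ p.2)

theorem pvLcp_self (u : List Char) : pvLcp u u = u.length := by
  induction u with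
  | nil => simp [pvLcp]
  | cons x xs ih => simp [pvLcp, ih]

theorem pvCM_zero_iff (u v : List Char) (h : u.length = v.length) :
    pvCM u v = 0 ↔ u = v := by
  induction u generalizing v with
  | nil => cases v <;> simp_all [pvCM]
  | cons x xs ih =>
    cases v with
    | nil => simp at h
    | cons y ys =>
      simp only [List.length_cons] at h
      simp only [pvCM, List.zip_cons_cons, List.countP_cons] at *
      rcases eq_or_ne x y with hxy | hxy
      · subst hxy
        simpa using ih ys (by omega)
      · simp [hxy]

theorem pvCM_le_one_iff (u v : List Char) (h : u.length = v.length) :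
    pvCM u v ≤ 1 ↔ u.length ≤ pvLcp u v + pvLcp u.reverse v.reverse + 1 := by
  induction u generalizing v with
  | nil => cases v <;> simp_all [pvCM, pvLcp]
  | cons x xs ih =>
    cases v with
    | nil => simp at h
    | cons y ys =>
      simp only [List.length_cons] at h
      have hlen : xs.length = ys.length := by omega
      simp only [List.reverse_cons]
      rcases eq_or_ne x y with hxy | hxy
      · subst hxy
        rcases eq_or_ne xs ys with hx | hx
        · subst hx
          have h1 : pvCM (x :: xs) (x :: xs) = 0 := (pvCM_zero_iff _ _ rfl).mpr rfl
          have h3 : pvLcp (xs.reverse ++ [x]) (xs.reverse ++ [x]) = xs.length + 1 := by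
            rw [pvLcp_self]; simp
          rw [h1, h3]
          simp only [List.length_cons]
          constructor <;> intro _ <;> omega
        · have hrev : xs.reverse ≠ ys.reverse := by simpa using hx
          have hq : pvLcp (xs.reverse ++ [x]) (ys.reverse ++ [x]) = pvLcp xs.reverse ys.reverse :=
            pvLcp_append_ne _ _ _ _ (by simpa using hlen) hrev
          have hcm : pvCM (x :: xs) (x :: ys) = pvCM xs ys := by
            simp [pvCM, List.zip_cons_cons]
          have hpl : pvLcp (x :: xs) (x :: ys) = pvLcp xs ys + 1 := by simp [pvLcp]
          rw [hcm, hq, hpl]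
          simp only [List.length_cons]
          rw [ih ys hlen]
          omega
      · have hcm : pvCM (x :: xs) (y :: ys) = pvCM xs ys + 1 := by
          simp [pvCM, List.zip_cons_cons, hxy]
        have hp : pvLcp (x :: xs) (y :: ys) = 0 := by simp [pvLcp, hxy]
        rw [hcm, hp]
        rcases eq_or_ne xs ys with hx | hx
        · subst hx
          have hq := pvLcp_append_left xs.reverse [x] [y]
          have h2 : pvLcp [x] [y] = 0 := by simp [pvLcp, hxy]
          rw [h2] at hq
          have h0 : pvCM xs xs = 0 := (pvCM_zero_iff xs xs rfl).mpr rfl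
          rw [hq, h0]
          simp
        · have hrev : xs.reverse ≠ ys.reverse := by simpa using hx
          have hq : pvLcp (xs.reverse ++ [x]) (ys.reverse ++ [y]) = pvLcp xs.reverse ys.reverse :=
            pvLcp_append_ne _ _ _ _ (by simpa using hlen) hrev
          have hlt : pvLcp xs.reverse ys.reverse < xs.reverse.length :=
            pvLcp_lt_of_ne _ _ (by simpa using hlen) hrev
          have h0 : pvCM xs ys ≠ 0 := fun hc => hx ((pvCM_zero_iff xs ys hlen).mp hc)
          rw [hq]
          simp only [List.length_reverse] at hlt
          simp only [List.length_cons]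
          omega

theorem pvLoopA_one (x y : List Char) (h : x.length = y.length) :
    pvLoopA x y 1 = decide (x = y) := by
  induction x generalizing y with
  | nil =>
    cases y with
    | nil => simp [pvLoopA]
    | cons b ys => simp at h
  | cons a xs ih =>
    cases y with
    | nil => simp at h
    | cons b ys =>
      simp only [List.length_cons] at h
      rcases eq_or_ne a b with hab | hab
      · subst hab
        rw [pvLoopA, if_pos rfl, ih ys (by omega)]
        simp
      · rw [pvLoopA, if_neg hab, if_pos (by omega)]
        simp [hab]

theorem pvLoopA_zero (s l : List Char) (h : l.length = s.length + 1) :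
    pvLoopA s l 0 = true ↔ s.drop (pvLcp s l) = l.drop (pvLcp s l + 1) := by
  induction s generalizing l with
  | nil =>
    cases l with
    | nil => simp at h
    | cons y l' =>
      simp only [List.length_cons, List.length_nil] at h
      have : l' = [] := List.eq_nil_of_length_eq_zero (by omega)
      subst this
      simp [pvLoopA, pvLcp]
  | cons x s' ih =>
    cases l with
    | nil => simp at h
    | cons y l' =>
      simp only [List.length_cons] at h
      rcases eq_or_ne x y with hxy | hxy
      · subst hxy
        rw [pvLoopA, if_pos rfl]
        have hpl : pvLcp (x :: s') (x :: l') = pvLcp s' l' + 1 := by simp [pvLcp]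
        rw [hpl]
        simpa using ih l' (by omega)
      · rw [pvLoopA, if_neg hxy, if_neg (by omega)]
        have hlen : (x :: s').length = l'.length := by simp; omega
        rw [pvLoopA_one _ _ hlen]
        have hpl : pvLcp (x :: s') (y :: l') = 0 := by simp [pvLcp, hxy]
        rw [hpl]
        simp

theorem pvSuffix_iff (s l : List Char) (h : l.length = s.length + 1) :
    s.length ≤ pvLcp s l + pvLcp s.reverse l.reverse ↔
      s.drop (pvLcp s l) = l.drop (pvLcp s l + 1) := by
  have hp : pvLcp s l ≤ s.length := pvLcp_le_left s l
  have hds : (s.drop (pvLcp s l)).reverse = s.reverse.take (s.length - pvLcp s l) :=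
    List.reverse_drop
  have hdl : (l.drop (pvLcp s l + 1)).reverse = l.reverse.take (s.length - pvLcp s l) := by
    rw [List.reverse_drop, h]
    congr 1
    omega
  constructor
  · intro hsum
    have hk : s.length - pvLcp s l ≤ pvLcp s.reverse l.reverse := by omega
    have htake : s.reverse.take (s.length - pvLcp s l) = l.reverse.take (s.length - pvLcp s l) := by
      have h1 := pvLcp_take s.reverse l.reverse
      calc s.reverse.take (s.length - pvLcp s l)
          = (s.reverse.take (pvLcp s.reverse l.reverse)).take (s.length - pvLcp s l) := by
            rw [List.take_take, Nat.min_eq_left hk]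
        _ = (l.reverse.take (pvLcp s.reverse l.reverse)).take (s.length - pvLcp s l) := by rw [h1]
        _ = l.reverse.take (s.length - pvLcp s l) := by
            rw [List.take_take, Nat.min_eq_left hk]
    have : (s.drop (pvLcp s l)).reverse = (l.drop (pvLcp s l + 1)).reverse := by
      rw [hds, hdl, htake]
    exact List.reverse_injective this
  · intro hdrop
    have htake : s.reverse.take (s.length - pvLcp s l) = l.reverse.take (s.length - pvLcp s l) := by
      rw [← hds, ← hdl, hdrop]
    have := pvLcp_ge_of_take s.reverse l.reverse (s.length - pvLcp s l)
      (by simp) (by simp; omega) htake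
    omega

-- ===== VERDICT (by name: the statement is the Claim_ definition above) =====
theorem is_close_token_py_spec : Claim_equal_is_close_token_py := by
  intro a b _hd
  unfold Spec_is_close_token_py is_close_token_py is_close_token_py_alt
  set a' := pvTokBase a.toList with ha'
  set b' := pvTokBase b.toList with hb'
  dsimp only
  split_ifs with h1 h2 h3 h4 h5 hlt
  · rfl
  · rfl
  · rfl
  · rfl
  · -- equal lengths: Hamming count vs prefix+suffix threshold
    have hfold : (a'.zip b').foldl (fun acc p => if p.1 ≠ p.2 then acc + 1 else acc) (0 : Int)
        = (pvCM a' b' : Int) := by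
      have := PySem.List.foldl_count_if (fun p : Char × Char => decide (p.1 ≠ p.2)) (a'.zip b') 0
      simpa [pvCM] using this
    rw [hfold]
    apply decide_eq_decide.mpr
    rw [show ((pvCM a' b' : Int) ≤ 1 ↔ pvCM a' b' ≤ 1) by omega]
    rw [pvCM_le_one_iff a' b' h5]
    omega
  · -- lengths differ by one: greedy scan vs prefix+suffix threshold (b' longer)
    have hlen : b'.length = a'.length + 1 := by omega
    rw [Bool.eq_iff_iff]
    simp only [decide_eq_true_eq]
    rw [pvLoopA_zero a' b' hlen, ← pvSuffix_iff a' b' hlen]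
    omega
  · -- lengths differ by one: greedy scan vs prefix+suffix threshold (a' longer)
    have hlen : a'.length = b'.length + 1 := by omega
    dsimp only
    rw [Bool.eq_iff_iff]
    simp only [decide_eq_true_eq]
    rw [pvLoopA_zero b' a' hlen, ← pvSuffix_iff b' a' hlen]
    rw [pvLcp_comm b' a', pvLcp_comm b'.reverse a'.reverse]
    omega
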